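-- pv_equiv track=rewrite | github.com/RamChandra1528/DAA_Assignments | Assignment_5_Greedy_Algorithm/Q23.py | catchThieves
-- ===== SOURCE A (Python) =====
-- from typing import List
--
-- def catchThieves(arr: List[str], n: int, k: int) -> int:
--     police = []
--     thieves = []
--
--     # Store indices of police and thieves
--     for i in range(n):
--         if arr[i] == 'P':
--             police.append(i)
--         elif arr[i] == 'T':
--             thieves.append(i)
--
--     i = 0  # Pointer for police
--     j = 0  # Pointer for thieves
--     caught = 0
--
--     # Process the indices
--     while i < len(police) and j < len(thieves):
--         if abs(police[i] - thieves[j]) <= k: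
--             # If distance between police and thief is within k, catch the thief
--             caught += 1
--             i += 1
--             j += 1
--         elif police[i] < thieves[j]:
--             # If current police is before the current thief, move to next police
--             i += 1
--         else:
--             # If current thief is before the current police, move to next thief
--             j += 1
--
--     return caught
-- ===== SOURCE B (Python) =====
-- from typing import List
-- from collections import deque
--
-- def catchThieves(arr: List[str], n: int, k: int) -> int:
--     # single pass with two FIFO queues of pending unmatched indices
--     pending_police = deque()
--     pending_thieves = deque()
--     caught = 0
--     for i in range(n):
--         c = arr[i]
--         if c == 'P':
--             while pending_thieves and pending_thieves[0] < i - k: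
--                 pending_thieves.popleft()
--             if pending_thieves:
--                 pending_thieves.popleft()
--                 caught += 1
--             else:
--                 pending_police.append(i)
--         elif c == 'T':
--             while pending_police and pending_police[0] < i - k:
--                 pending_police.popleft()
--             if pending_police:
--                 pending_police.popleft()
--                 caught += 1
--             else:
--                 pending_thieves.append(i)
--     return caught
-- ===== Notes on version B (the rewrite author's own statement) =====
-- stated objective: alternative
-- what changed: A builds police and thief index lists then runs a two-pointer greedy sweep over them; B fuses everything into a single pass over the positions keeping two FIFO queues of pending unmatched police/thief indices, pruning out-of-range fronts and matching on the fly.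
import Mathlib
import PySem

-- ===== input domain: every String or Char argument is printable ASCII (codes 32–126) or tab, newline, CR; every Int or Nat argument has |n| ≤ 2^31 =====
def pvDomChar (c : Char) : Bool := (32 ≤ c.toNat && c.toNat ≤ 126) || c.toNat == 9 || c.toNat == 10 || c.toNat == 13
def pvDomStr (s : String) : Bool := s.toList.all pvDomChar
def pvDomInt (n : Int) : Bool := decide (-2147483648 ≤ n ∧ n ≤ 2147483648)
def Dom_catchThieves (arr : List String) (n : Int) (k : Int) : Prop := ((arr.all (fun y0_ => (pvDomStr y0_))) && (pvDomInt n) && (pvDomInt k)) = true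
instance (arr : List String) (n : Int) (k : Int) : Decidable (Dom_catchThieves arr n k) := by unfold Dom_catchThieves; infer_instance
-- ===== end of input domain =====

-- B replaces A's two-list build followed by a two-pointer sweep with a single pass
-- over the positions keeping two FIFO queues of pending unmatched indices (alternative
-- decomposition, same asymptotic cost).

-- ===== PORT A =====
-- the while loop over the two index lists (two-pointer greedy)
def pvCatchLoop (k : Int) : List Int → List Int → Int
  | [], _ => 0
  | _ :: _, [] => 0
  | p :: ps, t :: ts =>
    if |p - t| ≤ k then 1 + pvCatchLoop k ps ts
    else if p < t then pvCatchLoop k ps (t :: ts)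
    else pvCatchLoop k (p :: ps) ts
termination_by ps ts => ps.length + ts.length
decreasing_by all_goals simp only [List.length_cons]; omega

-- the for-loop body collecting police and thief indices
def pvStepA (arr : List String) (pt : List Int × List Int) (i : Int) : List Int × List Int :=
  match PySem.List.pyGet? arr i with
  | some s =>
    if s == "P" then (pt.1 ++ [i], pt.2)
    else if s == "T" then (pt.1, pt.2 ++ [i])
    else pt
  | none => pt

def catchThieves (arr : List String) (n : Int) (k : Int) : Int :=
  let pt := (PySem.List.pyRange 0 n 1).foldl (pvStepA arr) ([], [])
  pvCatchLoop k pt.1 pt.2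

-- ===== PORT B =====
-- the inner while loop discarding out-of-range queued indices from the front
def pvPrune (lim : Int) : List Int → List Int
  | [] => []
  | x :: xs => if x < lim then pvPrune lim xs else x :: xs

-- the for-loop body: state = (pending police, pending thieves, caught)
def pvStepB (arr : List String) (k : Int) (st : List Int × List Int × Int) (i : Int) :
    List Int × List Int × Int :=
  match PySem.List.pyGet? arr i with
  | some s =>
    if s == "P" then
      match pvPrune (i - k) st.2.1 with
      | _ :: qt' => (st.1, qt', st.2.2 + 1)
      | [] => (st.1 ++ [i], [], st.2.2)
    else if s == "T" then
      match pvPrune (i - k) st.1 with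
      | _ :: qp' => (qp', st.2.1, st.2.2 + 1)
      | [] => ([], st.2.1 ++ [i], st.2.2)
    else st
  | none => st

def catchThieves_alt (arr : List String) (n : Int) (k : Int) : Int :=
  ((PySem.List.pyRange 0 n 1).foldl (pvStepB arr k) ([], [], 0)).2.2

-- ===== PRECONDITION & SPEC =====
-- Pre_ excludes exactly n > len(arr), on which Python A raises IndexError (arr[i] out of range).
def Pre_catchThieves (arr : List String) (n : Int) (k : Int) : Prop := n ≤ (arr.length : Int)
instance (arr : List String) (n : Int) (k : Int) : Decidable (Pre_catchThieves arr n k) := by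
  unfold Pre_catchThieves; infer_instance

def pvWitness_catchThieves : List String × Int × Int := (["P", "X", "T", "T", "P"], 5, 2)

def Spec_catchThieves (arr : List String) (n : Int) (k : Int) (out : Int) : Prop := out = catchThieves_alt arr n k
instance (arr : List String) (n : Int) (k : Int) (out : Int) : Decidable (Spec_catchThieves arr n k out) := by unfold Spec_catchThieves; infer_instance

-- ===== CLAIM (what is proved, stated in full; the proofs are below) =====
def Claim_equal_catchThieves : Prop := ∀ (arr : List String) (n : Int) (k : Int), Dom_catchThieves arr n k → Pre_catchThieves arr n k → Spec_catchThieves arr n k (catchThieves arr n k)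

-- ===== LEMMAS AND PROOFS =====

-- the police / thief index lists A builds, as filters of the scanned index list
def pvPol (arr : List String) (l : List Int) : List Int :=
  l.filter (fun i => PySem.List.pyGet? arr i == some "P")
def pvThv (arr : List String) (l : List Int) : List Int :=
  l.filter (fun i => PySem.List.pyGet? arr i == some "T")

theorem pvPol_cons_P (arr : List String) (i : Int) (l : List Int)
    (h : PySem.List.pyGet? arr i = some "P") : pvPol arr (i :: l) = i :: pvPol arr l := by
  simp [pvPol, h]
theorem pvThv_cons_P (arr : List String) (i : Int) (l : List Int)
    (h : PySem.List.pyGet? arr i = some "P") : pvThv arr (i :: l) = pvThv arr l := by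
  simp [pvThv, h]
theorem pvPol_cons_T (arr : List String) (i : Int) (l : List Int)
    (h : PySem.List.pyGet? arr i = some "T") : pvPol arr (i :: l) = pvPol arr l := by
  simp [pvPol, h]
theorem pvThv_cons_T (arr : List String) (i : Int) (l : List Int)
    (h : PySem.List.pyGet? arr i = some "T") : pvThv arr (i :: l) = i :: pvThv arr l := by
  simp [pvThv, h]
theorem pvPol_cons_other (arr : List String) (i : Int) (l : List Int)
    (h : PySem.List.pyGet? arr i ≠ some "P") : pvPol arr (i :: l) = pvPol arr l := by
  simp [pvPol, h]
theorem pvThv_cons_other (arr : List String) (i : Int) (l : List Int)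
    (h : PySem.List.pyGet? arr i ≠ some "T") : pvThv arr (i :: l) = pvThv arr l := by
  simp [pvThv, h]


theorem foldA_eq (arr : List String) :
    ∀ (l : List Int) (acc : List Int × List Int),
      l.foldl (pvStepA arr) acc = (acc.1 ++ pvPol arr l, acc.2 ++ pvThv arr l) := by
  intro l
  induction l with
  | nil => intro acc; simp [pvPol, pvThv]
  | cons i l ih =>
    intro acc
    simp only [List.foldl_cons, ih]
    simp only [pvStepA]
    cases h : PySem.List.pyGet? arr i with
    | none =>
      rw [pvPol_cons_other arr i l (by simp [h]), pvThv_cons_other arr i l (by simp [h])]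
    | some s =>
      by_cases hP : s = "P"
      · subst hP
        rw [pvPol_cons_P arr i l h, pvThv_cons_P arr i l h]
        simp
      · by_cases hT : s = "T"
        · subst hT
          rw [pvPol_cons_T arr i l h, pvThv_cons_T arr i l h]
          simp
        · rw [pvPol_cons_other arr i l (by simp [h, hP]),
            pvThv_cons_other arr i l (by simp [h, hT])]
          simp [hP, hT]

theorem mem_pvPrune {lim : Int} : ∀ {xs : List Int} {x : Int}, x ∈ pvPrune lim xs → x ∈ xs := by
  intro xs
  induction xs with
  | nil => intro x hx; simp [pvPrune] at hx
  | cons y ys ih =>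
    intro x hx
    simp only [pvPrune] at hx
    split at hx
    · exact List.mem_cons_of_mem _ (ih hx)
    · exact hx

theorem pvPrune_head_ge {lim : Int} : ∀ {xs : List Int} {y : Int} {ys : List Int},
    pvPrune lim xs = y :: ys → lim ≤ y := by
  intro xs
  induction xs with
  | nil => intro y ys h; simp [pvPrune] at h
  | cons z zs ih =>
    intro y ys h
    simp only [pvPrune] at h
    split at h
    · exact ih h
    · cases h; omega

-- pruning thieves smaller than i-k does not change the two-pointer result (A skips them too)
theorem skipT (k i : Int) (P T : List Int) :
    ∀ (qt : List Int), (∀ t ∈ qt, t < i) →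
      pvCatchLoop k (i :: P) (qt ++ T) = pvCatchLoop k (i :: P) (pvPrune (i - k) qt ++ T) := by
  intro qt
  induction qt with
  | nil => intro _; simp [pvPrune]
  | cons t qt ih =>
    intro hlt
    simp only [pvPrune]
    split
    · rename_i hdrop
      have h1 : ¬ |i - t| ≤ k := by rw [abs_le]; omega
      have h2 : ¬ i < t := by have := hlt t (by simp); omega
      rw [List.cons_append, pvCatchLoop, if_neg h1, if_neg h2]
      exact ih (fun x hx => hlt x (List.mem_cons_of_mem _ hx))
    · rfl

-- pruning police smaller than i-k does not change the two-pointer result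
theorem skipP (k i : Int) (P T : List Int) :
    ∀ (qp : List Int), (∀ p ∈ qp, p < i) →
      pvCatchLoop k (qp ++ P) (i :: T) = pvCatchLoop k (pvPrune (i - k) qp ++ P) (i :: T) := by
  intro qp
  induction qp with
  | nil => intro _; simp [pvPrune]
  | cons p qp ih =>
    intro hlt
    simp only [pvPrune]
    split
    · rename_i hdrop
      have h1 : ¬ |p - i| ≤ k := by rw [abs_le]; omega
      have h2 : p < i := hlt p (by simp)
      rw [List.cons_append, pvCatchLoop, if_neg h1, if_pos h2]
      exact ih (fun x hx => hlt x (List.mem_cons_of_mem _ hx))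
    · rfl

theorem pvCatchLoop_nil_right (k : Int) (P : List Int) : pvCatchLoop k P [] = 0 := by
  cases P <;> simp [pvCatchLoop]

-- main invariant: B's single pass with pending queues computes A's two-pointer count
theorem mainInv (arr : List String) (k : Int) :
    ∀ (l qp qt : List Int) (c : Int),
      l.Pairwise (· < ·) →
      (qp = [] ∨ qt = []) →
      (∀ x ∈ qp, ∀ y ∈ l, x < y) →
      (∀ x ∈ qt, ∀ y ∈ l, x < y) →
      (l.foldl (pvStepB arr k) (qp, qt, c)).2.2
        = c + pvCatchLoop k (qp ++ pvPol arr l) (qt ++ pvThv arr l) := by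
  intro l
  induction l with
  | nil =>
    intro qp qt c _ hemp _ _
    rcases hemp with h | h <;> subst h <;>
      simp [pvPol, pvThv, pvCatchLoop, pvCatchLoop_nil_right]
  | cons i l ih =>
    intro qp qt c hpw hemp hqp hqt
    have hpw' := (List.pairwise_cons.mp hpw).2
    have hil : ∀ y ∈ l, i < y := (List.pairwise_cons.mp hpw).1
    have hqp' : ∀ x ∈ qp, ∀ y ∈ l, x < y :=
      fun x hx y hy => hqp x hx y (List.mem_cons_of_mem _ hy)
    have hqt' : ∀ x ∈ qt, ∀ y ∈ l, x < y :=
      fun x hx y hy => hqt x hx y (List.mem_cons_of_mem _ hy)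
    simp only [List.foldl_cons]
    simp only [pvStepB]
    cases h : PySem.List.pyGet? arr i with
    | none =>
      rw [ih qp qt c hpw' hemp hqp' hqt',
        pvPol_cons_other arr i l (by simp [h]), pvThv_cons_other arr i l (by simp [h])]
    | some s =>
      by_cases hP : s = "P"
      · subst hP
        simp only [beq_self_eq_true, if_true]
        rw [pvPol_cons_P arr i l h, pvThv_cons_P arr i l h]
        cases hq : pvPrune (i - k) qt with
        | nil =>
          rw [ih (qp ++ [i]) [] c hpw' (Or.inr rfl)
            (by intro x hx y hy
                rcases List.mem_append.mp hx with h' | h'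
                · exact hqp' x h' y hy
                · simp at h'; subst h'; exact hil y hy)
            (by intro x hx; simp at hx)]
          rw [List.append_assoc, List.singleton_append, List.nil_append]
          rcases hemp with hqpe | hqte
          · subst hqpe
            simp only [List.nil_append]
            rw [skipT k i (pvPol arr l) (pvThv arr l) qt
                (fun t ht => hqt t ht i List.mem_cons_self), hq, List.nil_append]
          · subst hqte
            simp
        | cons t qt' =>
          have hqtne : qt ≠ [] := by
            intro he; subst he; simp [pvPrune] at hq
          have hqpe : qp = [] := by
            rcases hemp with h' | h'
            · exact h'
            · exact absurd h' hqtne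
          subst hqpe
          have ht_mem : t ∈ qt := mem_pvPrune (by rw [hq]; simp)
          have ht_lt : t < i := hqt t ht_mem i List.mem_cons_self
          have ht_ge : i - k ≤ t := pvPrune_head_ge hq
          rw [ih [] qt' (c + 1) hpw' (Or.inl rfl)
            (by intro x hx; simp at hx)
            (by intro x hx y hy
                have : x ∈ qt := mem_pvPrune (by rw [hq]; exact List.mem_cons_of_mem _ hx)
                exact hqt' x this y hy)]
          simp only [List.nil_append]
          rw [skipT k i (pvPol arr l) (pvThv arr l) qt
              (fun x hx => hqt x hx i List.mem_cons_self), hq,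
            List.cons_append, pvCatchLoop,
            if_pos (by rw [abs_le]; constructor <;> omega)]
          omega
      · by_cases hT : s = "T"
        · subst hT
          have hPf : (("T" : String) == "P") = false := by decide
          simp only [hPf, Bool.false_eq_true, if_false, beq_self_eq_true, if_true]
          rw [pvPol_cons_T arr i l h, pvThv_cons_T arr i l h]
          cases hq : pvPrune (i - k) qp with
          | nil =>
            rw [ih [] (qt ++ [i]) c hpw' (Or.inl rfl)
              (by intro x hx; simp at hx)
              (by intro x hx y hy
                  rcases List.mem_append.mp hx with h' | h'
                  · exact hqt' x h' y hy
                  · simp at h'; subst h'; exact hil y hy)]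
            rw [List.append_assoc, List.singleton_append, List.nil_append]
            rcases hemp with hqpe | hqte
            · subst hqpe
              simp
            · subst hqte
              simp only [List.nil_append]
              rw [skipP k i (pvPol arr l) (pvThv arr l) qp
                (fun p hp => hqp p hp i List.mem_cons_self), hq, List.nil_append]
          | cons p qp' =>
            have hqpne : qp ≠ [] := by
              intro he; subst he; simp [pvPrune] at hq
            have hqte : qt = [] := by
              rcases hemp with h' | h'
              · exact absurd h' hqpne
              · exact h'
            subst hqte
            have hp_mem : p ∈ qp := mem_pvPrune (by rw [hq]; simp)
            have hp_lt : p < i := hqp p hp_mem i List.mem_cons_self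
            have hp_ge : i - k ≤ p := pvPrune_head_ge hq
            rw [ih qp' [] (c + 1) hpw' (Or.inr rfl)
              (by intro x hx y hy
                  have : x ∈ qp := mem_pvPrune (by rw [hq]; exact List.mem_cons_of_mem _ hx)
                  exact hqp' x this y hy)
              (by intro x hx; simp at hx)]
            simp only [List.nil_append]
            rw [skipP k i (pvPol arr l) (pvThv arr l) qp
                (fun x hx => hqp x hx i List.mem_cons_self), hq,
              List.cons_append, pvCatchLoop,
              if_pos (by rw [abs_le]; constructor <;> omega)]
            omega
        · have h1 : (s == "P") = false := by simp [hP]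
          have h2 : (s == "T") = false := by simp [hT]
          simp only [h1, h2, Bool.false_eq_true, if_false]
          rw [ih qp qt c hpw' hemp hqp' hqt',
            pvPol_cons_other arr i l (by simp [h, hP]),
            pvThv_cons_other arr i l (by simp [h, hT])]

-- ===== VERDICT (by name: the statement is the Claim_ definition above) =====
theorem catchThieves_spec : Claim_equal_catchThieves := by
  intro arr n k _ _
  unfold Spec_catchThieves catchThieves catchThieves_alt
  rw [foldA_eq]
  rw [mainInv arr k (PySem.List.pyRange 0 n 1) [] [] 0
    (PySem.List.pairwise_lt_pyRange_one 0 n)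
    (Or.inl rfl) (by intro x hx; simp at hx) (by intro x hx; simp at hx)]
  simp
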